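-- pv_equiv track=rewrite | github.com/windikite/PythonStringsAssignment | productReviewAnalysis.py | tallyWords
-- ===== SOURCE A (Python) =====
-- def tallyWords(string):
--     string = str(string).lower()
--     positive_words = ["good", "excellent", "great", "awesome", "fantastic", "superb", "amazing"]
--     negative_words = ["bad", "poor", "terrible", "horrible", "awful", "disappointing", "subpar"]
--     words = positive_words + negative_words
--     positive = []
--     negative = []
--     for word in words:
--         found = string.find(word)
--         while found != -1:
--             word_length = len(word)
--             first = string[0:found]
--             second = string[found+word_length:]
--             string = first + second
--             if word in positive_words:
--                 positive.append(word)
--             elif word in negative_words: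
--                 negative.append(word)
--             found = string.find(word)
--     return len(positive), len(negative)
-- ===== SOURCE B (Python) =====
-- # B: per sentiment word, a single left-to-right stack scan removes every
-- # occurrence (including ones created by earlier removals), instead of A's
-- # repeated find-and-rebuild passes over the whole string.
-- def tallyWords(string):
--     s = str(string).lower()
--     positive_words = ["good", "excellent", "great", "awesome", "fantastic", "superb", "amazing"]
--     negative_words = ["bad", "poor", "terrible", "horrible", "awful", "disappointing", "subpar"]
--
--     def remove_all(text, word):
--         n = len(word)
--         stack = []
--         count = 0
--         for ch in text:
--             stack.append(ch)
--             if len(stack) >= n and "".join(stack[-n:]) == word: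
--                 del stack[-n:]
--                 count += 1
--         return "".join(stack), count
--
--     pos = 0
--     for word in positive_words:
--         s, c = remove_all(s, word)
--         pos += c
--     neg = 0
--     for word in negative_words:
--         s, c = remove_all(s, word)
--         neg += c
--     return pos, neg
-- ===== Notes on version B (the rewrite author's own statement) =====
-- stated objective: alternative
-- what changed: Each sentiment word is removed by a single left-to-right stack scan (pop the word whenever it completes on top of the stack, which also catches matches created by earlier removals), instead of A's repeated find-from-the-start, slice and re-concatenate passes over the whole string.
import Mathlib
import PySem

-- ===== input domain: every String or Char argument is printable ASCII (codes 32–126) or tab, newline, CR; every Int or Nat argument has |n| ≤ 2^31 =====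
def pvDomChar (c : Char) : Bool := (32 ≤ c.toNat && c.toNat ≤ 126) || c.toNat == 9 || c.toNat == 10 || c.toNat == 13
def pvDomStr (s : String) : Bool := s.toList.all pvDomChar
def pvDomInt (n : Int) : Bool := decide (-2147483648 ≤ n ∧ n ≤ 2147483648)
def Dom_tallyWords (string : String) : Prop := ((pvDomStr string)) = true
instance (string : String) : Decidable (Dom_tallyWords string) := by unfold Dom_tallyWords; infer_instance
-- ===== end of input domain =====

-- B replaces A's repeated find-and-rebuild passes by one left-to-right stack scan
-- per sentiment word (objective: alternative algorithm that avoids rescanning from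
-- the start after every removal).

-- ===== PORT A =====
def pvPositiveWords : List String :=
  ["good", "excellent", "great", "awesome", "fantastic", "superb", "amazing"]
def pvNegativeWords : List String :=
  ["bad", "poor", "terrible", "horrible", "awful", "disappointing", "subpar"]

-- A's inner 'while found != -1' loop. The dite guard only makes the recursion
-- well-founded; whenever the branch is reached it is true (the words are nonempty).
def tallyWhile (word : String) (s : List Char) (pos neg : List String) :
    List Char × List String × List String :=
  let found := PySem.Chars.find s word.toList
  if found = -1 then (s, pos, neg)
  else
    let first := PySem.List.slice s (some 0) (some found)
    let second := PySem.List.slice s (some (found + (word.toList.length : Int))) none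
    let s' := first ++ second
    let pn : List String × List String :=
      if word ∈ pvPositiveWords then (pos ++ [word], neg)
      else if word ∈ pvNegativeWords then (pos, neg ++ [word])
      else (pos, neg)
    if h : s'.length < s.length then tallyWhile word s' pn.1 pn.2 else (s', pn.1, pn.2)
termination_by s.length
decreasing_by exact h

def tallyWords (string : String) : Int × Int :=
  let s := PySem.Chars.lower string.toList
  let res := (pvPositiveWords ++ pvNegativeWords).foldl
      (fun st word => tallyWhile word st.1 st.2.1 st.2.2)
      (s, ([] : List String), ([] : List String))
  ((res.2.1.length : Int), (res.2.2.length : Int))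

-- ===== PORT B =====
-- one step of B's stack scan: push ch, pop the word if it just completed
def stackStep (w : List Char) (st : List Char × Nat) (c : Char) : List Char × Nat :=
  let st' := st.1 ++ [c]
  if w.length ≤ st'.length ∧ st'.drop (st'.length - w.length) = w then
    (st'.take (st'.length - w.length), st.2 + 1)
  else (st', st.2)

def removeAll (w : List Char) (s : List Char) : List Char × Nat :=
  s.foldl (stackStep w) ([], 0)

def tallyWords_alt (string : String) : Int × Int :=
  let s0 := PySem.Chars.lower string.toList
  let p := pvPositiveWords.foldl
      (fun acc word => let r := removeAll word.toList acc.1; (r.1, acc.2 + r.2)) (s0, 0)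
  let n := pvNegativeWords.foldl
      (fun acc word => let r := removeAll word.toList acc.1; (r.1, acc.2 + r.2)) (p.1, 0)
  ((p.2 : Int), (n.2 : Int))

-- ===== PRECONDITION & SPEC =====
def Spec_tallyWords (string : String) (out : Int × Int) : Prop := out = tallyWords_alt string
instance (string : String) (out : Int × Int) : Decidable (Spec_tallyWords string out) := by
  unfold Spec_tallyWords; infer_instance

-- ===== CLAIM (what is proved, stated in full; the proofs are below) =====
def Claim_equal_tallyWords : Prop :=
  ∀ (string : String), Dom_tallyWords string → Spec_tallyWords string (tallyWords string)

-- ===== LEMMAS AND PROOFS =====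

-- occurrence of w at some index i ↔ w is an infix
theorem pv_occ_iff (w s : List Char) : (∃ i, w <+: s.drop i) ↔ w <:+: s :=
  (PySem.Chars.exists_prefix_drop_iff_isIn w s).trans (PySem.Chars.isIn_iff_infix w s)

-- a prefix of an append that fits in the first part is a prefix of the first part
theorem pv_prefix_of_append_le (w a b : List Char) (h : w <+: a ++ b)
    (hl : w.length ≤ a.length) : w <+: a := by
  rw [List.prefix_iff_eq_take] at h ⊢
  rwa [List.take_append_of_le_length hl] at h

-- find returns the first occurrence: if w occurs at p and nowhere earlier, find = p
theorem pv_find_eq (s w : List Char) (p : Nat) (h1 : w <+: s.drop p)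
    (h2 : ∀ i, i < p → ¬ w <+: s.drop i) : PySem.Chars.find s w = (p : Int) := by
  have hocc : w <:+: s := (pv_occ_iff w s).mp ⟨p, h1⟩
  have hnn : 0 ≤ PySem.Chars.find s w := (PySem.Chars.find_nonneg_iff s w).mpr hocc
  have hspec := PySem.Chars.find_spec (s := s) (sub := w) hnn
  have hq : (PySem.Chars.find s w).toNat = p := by
    rcases lt_trichotomy (PySem.Chars.find s w).toNat p with h | h | h
    · exact absurd hspec.1 (h2 _ h)
    · exact h
    · exact absurd h1 (hspec.2 p h)
  omega

-- B's pop condition is exactly "w is a suffix"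
theorem pv_cond_iff_suffix (w st' : List Char) :
    (w.length ≤ st'.length ∧ st'.drop (st'.length - w.length) = w) ↔ w <:+ st' := by
  constructor
  · rintro ⟨hle, hdrop⟩
    have h := List.take_append_drop (st'.length - w.length) st'
    rw [hdrop] at h
    exact ⟨_, h⟩
  · rintro ⟨t, rfl⟩
    have hl : (t ++ w).length - w.length = t.length := by simp
    refine ⟨by simp, ?_⟩
    rw [hl, List.drop_left]

-- a snoc with no new suffix match keeps "no occurrence"
theorem pv_no_occ_snoc (w st : List Char) (c : Char) (hw : w ≠ []) (hno : ¬ w <:+: st)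
    (hns : ¬ w <:+ st ++ [c]) : ¬ w <:+: (st ++ [c]) := by
  intro hocc
  obtain ⟨i, hi⟩ := (pv_occ_iff w (st ++ [c])).mpr hocc
  have hwl : 0 < w.length := List.length_pos_iff.mpr hw
  have hll := hi.length_le
  simp only [List.length_drop, List.length_append, List.length_cons,
    List.length_nil] at hll
  have hlen : i + w.length ≤ st.length + 1 := by omega
  by_cases hcase : i + w.length ≤ st.length
  · -- occurrence lies inside st
    have hdrop : (st ++ [c]).drop i = st.drop i ++ [c] :=
      List.drop_append_of_le_length (by omega)
    rw [hdrop] at hi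
    have : w <+: st.drop i := by
      apply pv_prefix_of_append_le w _ _ hi
      simp only [List.length_drop]; omega
    exact hno ((pv_occ_iff w st).mp ⟨i, this⟩)
  · -- occurrence ends at c: w is a suffix of st ++ [c]
    have hlen2 : ((st ++ [c]).drop i).length = w.length := by
      simp only [List.length_drop, List.length_append, List.length_cons,
        List.length_nil]
      omega
    have heq : w = (st ++ [c]).drop i := by
      rw [List.prefix_iff_eq_take] at hi
      rw [hi, ← hlen2, List.take_length]
    exact hns (heq ▸ List.drop_suffix i (st ++ [c]))

-- with no occurrence in st and w a suffix of st ++ [c], the first occurrence in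
-- st ++ c :: s is the suffix one
theorem pv_find_snoc_fired (w st : List Char) (c : Char) (s : List Char) (hw : w ≠ [])
    (hno : ¬ w <:+: st) (hsuf : w <:+ st ++ [c]) :
    PySem.Chars.find (st ++ c :: s) w = ((st.length + 1 - w.length : Nat) : Int) := by
  obtain ⟨t, ht⟩ := hsuf
  have hlt : t.length + w.length = st.length + 1 := by
    have := congrArg List.length ht
    simp only [List.length_append, List.length_cons, List.length_nil] at this
    omega
  have hp : st.length + 1 - w.length = t.length := by omega
  rw [hp]
  apply pv_find_eq
  · have hsp : st ++ c :: s = t ++ (w ++ s) := by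
      have : (st ++ [c]) ++ s = t ++ (w ++ s) := by rw [← ht, List.append_assoc]
      simpa using this
    rw [hsp, List.drop_append_of_le_length (by omega), List.drop_length, List.nil_append]
    exact List.prefix_append w s
  · intro i hi hpre
    have hwl : 0 < w.length := List.length_pos_iff.mpr hw
    have hdrop : (st ++ c :: s).drop i = st.drop i ++ c :: s :=
      List.drop_append_of_le_length (by omega)
    rw [hdrop] at hpre
    have : w <+: st.drop i := by
      apply pv_prefix_of_append_le w _ _ hpre
      simp only [List.length_drop]; omega
    exact hno ((pv_occ_iff w st).mp ⟨i, this⟩)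

-- count offset in B's fold
theorem pv_shift (w : List Char) (s : List Char) : ∀ (st : List Char) (k : Nat),
    List.foldl (stackStep w) (st, k) s =
      ((List.foldl (stackStep w) (st, 0) s).1, k + (List.foldl (stackStep w) (st, 0) s).2) := by
  induction s with
  | nil => intro st k; simp
  | cons c s ih =>
    intro st k
    simp only [List.foldl_cons]
    by_cases hc : w.length ≤ (st ++ [c]).length ∧ (st ++ [c]).drop ((st ++ [c]).length - w.length) = w
    · simp only [stackStep, if_pos hc]
      rw [ih _ (k + 1), ih _ (0 + 1)]
      simp only [Prod.mk.injEq, true_and]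
      omega
    · simp only [stackStep, if_neg hc]
      rw [ih _ k, ih _ 0]

-- the per-iteration update of A's positive/negative lists
def pvUpd (word : String) (pn : List String × List String) : List String × List String :=
  if word ∈ pvPositiveWords then (pn.1 ++ [word], pn.2)
  else if word ∈ pvNegativeWords then (pn.1, pn.2 ++ [word])
  else pn

-- MAIN LEMMA: A's while loop on st ++ s equals B's stack scan of s started at stack st,
-- provided w does not occur in st
theorem pv_whileRun (word : String) (hw : word.toList ≠ []) (s : List Char) :
    ∀ (st : List Char) (pos neg : List String), ¬ word.toList <:+: st →
    tallyWhile word (st ++ s) pos neg =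
      ((List.foldl (stackStep word.toList) (st, 0) s).1,
       (pvUpd word)^[(List.foldl (stackStep word.toList) (st, 0) s).2] (pos, neg)) := by
  induction s with
  | nil =>
    intro st pos neg hno
    have hf : PySem.Chars.find st word.toList = -1 :=
      (PySem.Chars.find_eq_neg_one_iff st word.toList).mpr hno
    rw [List.append_nil, tallyWhile]
    simp [hf]
  | cons c s ih =>
    intro st pos neg hno
    by_cases hs : word.toList <:+ st ++ [c]
    · -- a match completes at c
      have hwl : 0 < word.toList.length := List.length_pos_iff.mpr hw
      have hnle : word.toList.length ≤ st.length + 1 := by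
        have := hs.length_le
        simpa using this
      set w := word.toList with hwdef
      set p : Nat := st.length + 1 - w.length with hpdef
      have hple : p ≤ st.length := by omega
      have hfind : PySem.Chars.find (st ++ c :: s) w = (p : Int) :=
        pv_find_snoc_fired w st c s hw hno hs
      -- unfold one step of A
      rw [tallyWhile]
      rw [if_neg (by rw [hfind]; omega)]
      have hslice1 : PySem.List.slice (st ++ c :: s) (some 0) (some (PySem.Chars.find (st ++ c :: s) w))
          = st.take p := by
        rw [hfind, PySem.List.slice_zero_start, PySem.List.slice_to _ (by positivity),
          Int.toNat_natCast]
        exact List.take_append_of_le_length hple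
      have hslice2 : PySem.List.slice (st ++ c :: s)
          (some (PySem.Chars.find (st ++ c :: s) w + (w.length : Int))) none = s := by
        rw [hfind, PySem.List.slice_from _ (by positivity)]
        have h1 : ((p : Int) + (w.length : Int)).toNat = p + w.length := by omega
        rw [h1]
        have h2 : p + w.length = (st ++ [c]).length := by simp; omega
        have h3 : st ++ c :: s = (st ++ [c]) ++ s := by simp
        rw [h2, h3, List.drop_left]
      rw [hslice1, hslice2]
      have hguard : (st.take p ++ s).length < (st ++ c :: s).length := by
        simp only [List.length_append, List.length_take, List.length_cons]
        omega
      rw [dif_pos hguard]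
      -- the recursive call is covered by the induction hypothesis
      have hno' : ¬ w <:+: st.take p := fun h => hno (h.trans (List.take_prefix p st).isInfix)
      rw [ih (st.take p) _ _ hno']
      -- B side: the step fires
      have hcond : w.length ≤ (st ++ [c]).length ∧
          (st ++ [c]).drop ((st ++ [c]).length - w.length) = w :=
        (pv_cond_iff_suffix w (st ++ [c])).mpr hs
      have hbstep : stackStep w (st, 0) c = (st.take p, 1) := by
        simp only [stackStep, if_pos hcond]
        have h2 : (st ++ [c]).length - w.length = p := by simp; omega
        rw [h2, List.take_append_of_le_length hple]
      rw [List.foldl_cons, hbstep, pv_shift w s (List.take p st) 1]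
      dsimp only
      have hiter : (pvUpd word)^[1 + (List.foldl (stackStep w) (List.take p st, 0) s).2] (pos, neg)
          = (pvUpd word)^[(List.foldl (stackStep w) (List.take p st, 0) s).2] (pvUpd word (pos, neg)) := by
        rw [Nat.add_comm, Function.iterate_succ_apply]
      rw [hiter]
      rfl
    · -- no match completes at c: push and continue
      have hno' : ¬ word.toList <:+: st ++ [c] := pv_no_occ_snoc word.toList st c hw hno hs
      have hstep : st ++ c :: s = (st ++ [c]) ++ s := by simp
      rw [hstep, ih (st ++ [c]) pos neg hno']
      have hcond : ¬ (word.toList.length ≤ (st ++ [c]).length ∧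
          (st ++ [c]).drop ((st ++ [c]).length - word.toList.length) = word.toList) :=
        fun h => hs ((pv_cond_iff_suffix _ _).mp h)
      rw [List.foldl_cons]
      simp only [stackStep, if_neg hcond]

-- iterating pvUpd for a positive word appends k entries to pos, keeps neg
theorem pv_upd_iter_fst (word : String) (hP : word ∈ pvPositiveWords) (k : Nat)
    (pn : List String × List String) :
    ((pvUpd word)^[k] pn).1.length = pn.1.length + k ∧ ((pvUpd word)^[k] pn).2 = pn.2 := by
  induction k generalizing pn with
  | zero => exact ⟨by simp, by simp⟩
  | succ k ih =>
    have hupd : pvUpd word pn = (pn.1 ++ [word], pn.2) := by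
      simp only [pvUpd, if_pos hP]
    rw [Function.iterate_succ_apply, hupd]
    have h := ih (pn.1 ++ [word], pn.2)
    simp only [List.length_append, List.length_cons, List.length_nil] at h
    exact ⟨by rw [h.1]; omega, h.2⟩

-- iterating pvUpd for a negative word appends k entries to neg, keeps pos
theorem pv_upd_iter_snd (word : String) (hP : word ∉ pvPositiveWords)
    (hN : word ∈ pvNegativeWords) (k : Nat) (pn : List String × List String) :
    ((pvUpd word)^[k] pn).2.length = pn.2.length + k ∧ ((pvUpd word)^[k] pn).1 = pn.1 := by
  induction k generalizing pn with
  | zero => exact ⟨by simp, by simp⟩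
  | succ k ih =>
    have hupd : pvUpd word pn = (pn.1, pn.2 ++ [word]) := by
      simp only [pvUpd, if_neg hP, if_pos hN]
    rw [Function.iterate_succ_apply, hupd]
    have h := ih (pn.1, pn.2 ++ [word])
    simp only [List.length_append, List.length_cons, List.length_nil] at h
    exact ⟨by rw [h.1]; omega, h.2⟩

-- per-word equivalence from the empty stack
theorem pv_word_step (word : String) (hw : word.toList ≠ []) (s : List Char)
    (pos neg : List String) :
    tallyWhile word s pos neg =
      ((removeAll word.toList s).1,
       (pvUpd word)^[(removeAll word.toList s).2] (pos, neg)) := by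
  have hno : ¬ word.toList <:+: ([] : List Char) := by
    intro h
    exact hw (List.sublist_nil.mp h.sublist)
  have h := pv_whileRun word hw s [] pos neg hno
  simpa [removeAll] using h

-- count offset in B's fold over words
theorem pv_bshift (ws : List String) : ∀ (s : List Char) (k : Nat),
    ws.foldl (fun acc word => let r := removeAll word.toList acc.1; (r.1, acc.2 + r.2)) (s, k) =
      ((ws.foldl (fun acc word => let r := removeAll word.toList acc.1; (r.1, acc.2 + r.2)) (s, 0)).1,
        k + (ws.foldl (fun acc word => let r := removeAll word.toList acc.1; (r.1, acc.2 + r.2)) (s, 0)).2) := by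
  induction ws with
  | nil => intro s k; simp
  | cons w ws ih =>
    intro s k
    simp only [List.foldl_cons]
    rw [ih _ (k + (removeAll w.toList s).2), ih _ (0 + (removeAll w.toList s).2)]
    simp only [Prod.mk.injEq, true_and]
    omega

-- A's fold over a list of positive words
theorem pv_foldPos (ws : List String)
    (h : ∀ w ∈ ws, w.toList ≠ [] ∧ w ∈ pvPositiveWords) :
    ∀ (s : List Char) (pos neg : List String),
    (ws.foldl (fun st word => tallyWhile word st.1 st.2.1 st.2.2) (s, pos, neg)).1 =
      (ws.foldl (fun acc word => let r := removeAll word.toList acc.1; (r.1, acc.2 + r.2)) (s, 0)).1 ∧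
    (ws.foldl (fun st word => tallyWhile word st.1 st.2.1 st.2.2) (s, pos, neg)).2.1.length =
      pos.length +
      (ws.foldl (fun acc word => let r := removeAll word.toList acc.1; (r.1, acc.2 + r.2)) (s, 0)).2 ∧
    (ws.foldl (fun st word => tallyWhile word st.1 st.2.1 st.2.2) (s, pos, neg)).2.2 = neg := by
  induction ws with
  | nil => intro s pos neg; exact ⟨rfl, by simp, rfl⟩
  | cons w ws ih =>
    intro s pos neg
    obtain ⟨hw, hP⟩ := h w (by simp)
    have h' : ∀ w ∈ ws, w.toList ≠ [] ∧ w ∈ pvPositiveWords := fun x hx => h x (by simp [hx])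
    simp only [List.foldl_cons]
    rw [pv_word_step w hw s pos neg]
    have hiter := pv_upd_iter_fst w hP (removeAll w.toList s).2 (pos, neg)
    simp only at hiter
    have hihs := ih h' (removeAll w.toList s).1
      ((pvUpd w)^[(removeAll w.toList s).2] (pos, neg)).1
      ((pvUpd w)^[(removeAll w.toList s).2] (pos, neg)).2
    simp only [Prod.mk.eta] at hihs
    rw [pv_bshift]
    dsimp only
    refine ⟨?_, ?_, ?_⟩
    · exact hihs.1
    · rw [hihs.2.1, hiter.1]; omega
    · rw [hihs.2.2, hiter.2]

-- A's fold over a list of negative words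
theorem pv_foldNeg (ws : List String)
    (h : ∀ w ∈ ws, w.toList ≠ [] ∧ w ∉ pvPositiveWords ∧ w ∈ pvNegativeWords) :
    ∀ (s : List Char) (pos neg : List String),
    (ws.foldl (fun st word => tallyWhile word st.1 st.2.1 st.2.2) (s, pos, neg)).1 =
      (ws.foldl (fun acc word => let r := removeAll word.toList acc.1; (r.1, acc.2 + r.2)) (s, 0)).1 ∧
    (ws.foldl (fun st word => tallyWhile word st.1 st.2.1 st.2.2) (s, pos, neg)).2.2.length =
      neg.length +
      (ws.foldl (fun acc word => let r := removeAll word.toList acc.1; (r.1, acc.2 + r.2)) (s, 0)).2 ∧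
    (ws.foldl (fun st word => tallyWhile word st.1 st.2.1 st.2.2) (s, pos, neg)).2.1 = pos := by
  induction ws with
  | nil => intro s pos neg; exact ⟨rfl, by simp, rfl⟩
  | cons w ws ih =>
    intro s pos neg
    obtain ⟨hw, hP, hN⟩ := h w (by simp)
    have h' : ∀ x ∈ ws, x.toList ≠ [] ∧ x ∉ pvPositiveWords ∧ x ∈ pvNegativeWords :=
      fun x hx => h x (by simp [hx])
    simp only [List.foldl_cons]
    rw [pv_word_step w hw s pos neg]
    have hiter := pv_upd_iter_snd w hP hN (removeAll w.toList s).2 (pos, neg)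
    simp only at hiter
    have hihs := ih h' (removeAll w.toList s).1
      ((pvUpd w)^[(removeAll w.toList s).2] (pos, neg)).1
      ((pvUpd w)^[(removeAll w.toList s).2] (pos, neg)).2
    simp only [Prod.mk.eta] at hihs
    rw [pv_bshift]
    dsimp only
    refine ⟨?_, ?_, ?_⟩
    · exact hihs.1
    · rw [hihs.2.1, hiter.1]; omega
    · rw [hihs.2.2, hiter.2]

-- ===== VERDICT (by name: the statement is the Claim_ definition above) =====
theorem tallyWords_spec : Claim_equal_tallyWords := by
  intro string _
  simp only [Spec_tallyWords, tallyWords, tallyWords_alt]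
  rw [List.foldl_append]
  have hPmem : ∀ w ∈ pvPositiveWords, w.toList ≠ [] ∧ w ∈ pvPositiveWords := by decide
  have hNmem : ∀ w ∈ pvNegativeWords,
      w.toList ≠ [] ∧ w ∉ pvPositiveWords ∧ w ∈ pvNegativeWords := by decide
  set s0 := PySem.Chars.lower string.toList
  have hP := pv_foldPos pvPositiveWords hPmem s0 [] []
  set A1 := pvPositiveWords.foldl (fun st word => tallyWhile word st.1 st.2.1 st.2.2)
    (s0, ([] : List String), ([] : List String)) with hA1
  have hN := pv_foldNeg pvNegativeWords hNmem A1.1 A1.2.1 A1.2.2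
  simp only [Prod.mk.eta] at hN
  rw [hP.1] at hN
  rw [hN.2.2, hN.2.1, hP.2.1, hP.2.2]
  dsimp only
  simp only [List.length_nil, Nat.zero_add]
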